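-- pv_equiv track=rewrite | github.com/NFTDefects/nftdefects | NFTGuard/input/utils.py | match_supply
-- ===== SOURCE A (Python) =====
-- def match_supply(id_to_state_vars, slot_map):
--     # usually MAX_SUPPLY, _TOTALSUPPLY, MAX_TOKENS, etc.
--     # *Add others: nextToken, totalMinted
--     # seperate to prefix and suffix
--     keywords_prefix = 'ALL,MAX,TOTAL,CURRENT,NEXT,TOTAL,TOKEN'
--     keywords_suffix = 'TOKEN,SUPPLY,INDEX,MINTED'
--     whole = 'COUNTER,SUPPLY,MINTCOUNT'
--     index = []
--     for id in id_to_state_vars: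
--         for key in id_to_state_vars[id]:
--             # match prefix
--             if any([w in key.upper() and w for w in keywords_prefix.split(',')]):
--                 # match suffix
--                 if any([w in key.upper() and w for w in keywords_suffix.split(',')]):
--                     if slot_map[id][key]["slot_id"] is not None:
--                         index.append(slot_map[id][key]["slot_id"])
--
--     for id in id_to_state_vars:
--         for key in id_to_state_vars[id]:
--             if any(w in key.upper() and w for w in whole.split(',')):
--                 if slot_map[id][key]["slot_id"] is not None:
--                     index.append(slot_map[id][key]["slot_id"])
--     return index
-- ===== SOURCE B (Python) =====
-- def match_supply(id_to_state_vars, slot_map):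
--     # One traversal instead of two: collect prefix+suffix hits and whole-keyword
--     # hits into two lists during a single pass, then concatenate.
--     prefixes = 'ALL,MAX,TOTAL,CURRENT,NEXT,TOTAL,TOKEN'.split(',')
--     suffixes = 'TOKEN,SUPPLY,INDEX,MINTED'.split(',')
--     wholes = 'COUNTER,SUPPLY,MINTCOUNT'.split(',')
--     ps_hits = []
--     whole_hits = []
--     for id, keys in id_to_state_vars.items():
--         for key in keys:
--             K = key.upper()
--             m1 = any(p in K for p in prefixes) and any(s in K for s in suffixes)
--             m2 = any(w in K for w in wholes)
--             if m1 or m2: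
--                 slot_id = slot_map[id][key]["slot_id"]
--                 if slot_id is not None:
--                     if m1:
--                         ps_hits.append(slot_id)
--                     if m2:
--                         whole_hits.append(slot_id)
--     return ps_hits + whole_hits
-- ===== Notes on version B (the rewrite author's own statement) =====
-- stated objective: simpler
-- what changed: B replaces A's two full scans of id_to_state_vars (prefix+suffix pass, then whole-keyword pass) by a single traversal that fills two result lists (prefix+suffix hits and whole-keyword hits) and returns their concatenation, computing key.upper() and the split keyword lists once.
-- outside the precondition, e.g. on match_supply({'c': ['totalSupply']}, {}): A raises KeyError, B raises KeyError
import Mathlib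
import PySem

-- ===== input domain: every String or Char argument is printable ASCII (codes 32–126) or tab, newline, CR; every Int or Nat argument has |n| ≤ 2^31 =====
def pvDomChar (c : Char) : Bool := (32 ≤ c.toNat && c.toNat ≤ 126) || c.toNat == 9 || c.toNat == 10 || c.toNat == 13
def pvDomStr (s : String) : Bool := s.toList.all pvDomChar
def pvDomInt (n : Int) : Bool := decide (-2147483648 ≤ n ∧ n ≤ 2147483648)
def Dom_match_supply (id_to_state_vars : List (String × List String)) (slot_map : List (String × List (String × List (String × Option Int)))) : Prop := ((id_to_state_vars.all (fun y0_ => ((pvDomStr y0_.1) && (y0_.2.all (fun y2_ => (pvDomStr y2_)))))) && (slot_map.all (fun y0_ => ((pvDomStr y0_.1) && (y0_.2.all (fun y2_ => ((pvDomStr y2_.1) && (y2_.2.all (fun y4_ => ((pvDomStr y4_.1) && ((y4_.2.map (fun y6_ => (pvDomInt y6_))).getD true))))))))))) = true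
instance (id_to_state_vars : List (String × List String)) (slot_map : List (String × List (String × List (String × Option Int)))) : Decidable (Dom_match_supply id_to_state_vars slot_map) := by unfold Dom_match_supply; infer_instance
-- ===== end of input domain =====

-- B does one traversal with two result lists instead of A's two full passes; objective: simpler.

-- ===== PORT A =====
-- kwstr.split(',')
def pvSplit (s : String) : List String := (PySem.Str.split? s ",").getD []

-- any([w in key.upper() and w for w in kwstr.split(',')])
def pvAnyKw (kwstr : String) (key : String) : Bool :=
  (pvSplit kwstr).any (fun w => PySem.Str.isIn w (PySem.Str.upper key) && !(w == ""))

-- A's lookup chain slot_map[id][key]["slot_id"]; none = KeyError in Python (excluded by Pre_)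
def pvSlotCell (slot_map : List (String × List (String × List (String × Option Int)))) (id key : String) : Option (Option Int) :=
  match (PySem.Dict.mk slot_map).get? id with
  | none => none
  | some inner =>
    match (PySem.Dict.mk inner).get? key with
    | none => none
    | some cell => (PySem.Dict.mk cell).get? "slot_id"

def match_supply (id_to_state_vars : List (String × List String)) (slot_map : List (String × List (String × List (String × Option Int)))) : List Int :=
  let keywords_prefix := "ALL,MAX,TOTAL,CURRENT,NEXT,TOTAL,TOKEN"
  let keywords_suffix := "TOKEN,SUPPLY,INDEX,MINTED"
  let whole := "COUNTER,SUPPLY,MINTCOUNT"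
  let index : List Int :=
    id_to_state_vars.foldl (fun index p =>
      ((PySem.Dict.mk id_to_state_vars).getD p.1 []).foldl (fun index key =>
        if pvAnyKw keywords_prefix key then
          if pvAnyKw keywords_suffix key then
            match pvSlotCell slot_map p.1 key with
            | some (some v) => index ++ [v]
            | _ => index
          else index
        else index) index) []
  id_to_state_vars.foldl (fun index p =>
    ((PySem.Dict.mk id_to_state_vars).getD p.1 []).foldl (fun index key =>
      if pvAnyKw whole key then
        match pvSlotCell slot_map p.1 key with
        | some (some v) => index ++ [v]
        | _ => index
      else index) index) index

-- ===== PORT B =====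
-- B's own split helper (B's Python calls .split(',') itself)
def pvAltSplit (s : String) : List String := (PySem.Str.split? s ",").getD []

-- B's lookup chain slot_map[id][key]["slot_id"]; none = KeyError in Python (excluded by Pre_)
def pvAltCell (slot_map : List (String × List (String × List (String × Option Int)))) (id key : String) : Option (Option Int) :=
  match (PySem.Dict.mk slot_map).get? id with
  | none => none
  | some inner =>
    match (PySem.Dict.mk inner).get? key with
    | none => none
    | some cell => (PySem.Dict.mk cell).get? "slot_id"

def match_supply_alt (id_to_state_vars : List (String × List String)) (slot_map : List (String × List (String × List (String × Option Int)))) : List Int :=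
  let prefixes := pvAltSplit "ALL,MAX,TOTAL,CURRENT,NEXT,TOTAL,TOKEN"
  let suffixes := pvAltSplit "TOKEN,SUPPLY,INDEX,MINTED"
  let wholes := pvAltSplit "COUNTER,SUPPLY,MINTCOUNT"
  let r :=
    id_to_state_vars.foldl (fun (acc : List Int × List Int) p =>
      p.2.foldl (fun (acc : List Int × List Int) key =>
        let K := PySem.Str.upper key
        let m1 := prefixes.any (fun w => PySem.Str.isIn w K) && suffixes.any (fun w => PySem.Str.isIn w K)
        let m2 := wholes.any (fun w => PySem.Str.isIn w K)
        if m1 || m2 then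
          -- slot_id = slot_map[id][key]["slot_id"] (KeyError excluded by Pre_)
          match (pvAltCell slot_map p.1 key).getD none with
          | some v =>
              ((if m1 then acc.1 ++ [v] else acc.1), (if m2 then acc.2 ++ [v] else acc.2))
          | none => acc
        else acc) acc) (([], []) : List Int × List Int)
  r.1 ++ r.2

-- ===== PRECONDITION & SPEC =====
-- a keyword of kwstr (comma-separated) occurs in key.upper()
def pvPreKw (kwstr : String) (key : String) : Bool :=
  ((PySem.Str.split? kwstr ",").getD []).any (fun w => PySem.Str.isIn w (PySem.Str.upper key))

-- the lookup chain slot_map[id][key]["slot_id"] (isSome ↔ no KeyError)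
def pvPreCell (slot_map : List (String × List (String × List (String × Option Int)))) (id key : String) : Option (Option Int) :=
  match (PySem.Dict.mk slot_map).get? id with
  | none => none
  | some inner =>
    match (PySem.Dict.mk inner).get? key with
    | none => none
    | some cell => (PySem.Dict.mk cell).get? "slot_id"

-- Pre_ excludes inputs where A raises KeyError (a keyword-matching (id, key) pair whose chain
-- slot_map[id][key]["slot_id"] is missing) and association lists with duplicate dict keys, on
-- which the Python-dict collapse makes any behaviour accidental.
def Pre_match_supply (id_to_state_vars : List (String × List String)) (slot_map : List (String × List (String × List (String × Option Int)))) : Prop :=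
  (id_to_state_vars.map Prod.fst).Nodup ∧ (slot_map.map Prod.fst).Nodup ∧
  (∀ p ∈ slot_map, (p.2.map Prod.fst).Nodup ∧ ∀ q ∈ p.2, (q.2.map Prod.fst).Nodup) ∧
  (∀ p ∈ id_to_state_vars, ∀ key ∈ p.2,
    ((pvPreKw "ALL,MAX,TOTAL,CURRENT,NEXT,TOTAL,TOKEN" key && pvPreKw "TOKEN,SUPPLY,INDEX,MINTED" key)
      || pvPreKw "COUNTER,SUPPLY,MINTCOUNT" key) = true → (pvPreCell slot_map p.1 key).isSome)

instance (id_to_state_vars : List (String × List String)) (slot_map : List (String × List (String × List (String × Option Int)))) : Decidable (Pre_match_supply id_to_state_vars slot_map) := by unfold Pre_match_supply; infer_instance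

def pvWitness_match_supply : (List (String × List String)) × (List (String × List (String × List (String × Option Int)))) :=
  ([("c", ["totalSupply"])], [("c", [("totalSupply", [("slot_id", some 1)])])])

def Spec_match_supply (id_to_state_vars : List (String × List String)) (slot_map : List (String × List (String × List (String × Option Int)))) (out : List Int) : Prop := out = match_supply_alt id_to_state_vars slot_map
instance (id_to_state_vars : List (String × List String)) (slot_map : List (String × List (String × List (String × Option Int)))) (out : List Int) : Decidable (Spec_match_supply id_to_state_vars slot_map out) := by unfold Spec_match_supply; infer_instance

-- ===== CLAIM (what is proved, stated in full; the proofs are below) =====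
def Claim_equal_match_supply : Prop := ∀ (id_to_state_vars : List (String × List String)) (slot_map : List (String × List (String × List (String × Option Int)))), Dom_match_supply id_to_state_vars slot_map → Pre_match_supply id_to_state_vars slot_map → Spec_match_supply id_to_state_vars slot_map (match_supply id_to_state_vars slot_map)

-- ===== LEMMAS AND PROOFS =====

def pvM1 (key : String) : Bool :=
  pvAnyKw "ALL,MAX,TOTAL,CURRENT,NEXT,TOTAL,TOKEN" key && pvAnyKw "TOKEN,SUPPLY,INDEX,MINTED" key
def pvM2 (key : String) : Bool := pvAnyKw "COUNTER,SUPPLY,MINTCOUNT" key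
def pvCellL (slot_map : List (String × List (String × List (String × Option Int)))) (id key : String) : List Int :=
  match pvSlotCell slot_map id key with | some (some v) => [v] | _ => []
def pvG1 (slot_map : List (String × List (String × List (String × Option Int)))) (id key : String) : List Int :=
  if pvM1 key then pvCellL slot_map id key else []
def pvG2 (slot_map : List (String × List (String × List (String × Option Int)))) (id key : String) : List Int :=
  if pvM2 key then pvCellL slot_map id key else []

theorem pvAltCell_eq : pvAltCell = pvSlotCell := rfl

theorem pvAnyKw_eq (s : String) (h : ∀ w ∈ pvSplit s, w ≠ "") (key : String) :
    pvAnyKw s key = (pvAltSplit s).any (fun w => PySem.Str.isIn w (PySem.Str.upper key)) := by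
  unfold pvAnyKw
  apply PySem.List.any_congr_mem
  intro w hw
  simp [h w hw]

theorem pvFoldl_append {α : Type} (u : α → List Int) (l : List α) (a : List Int) :
    l.foldl (fun acc x => acc ++ u x) a = a ++ l.flatMap u := by
  induction l generalizing a with
  | nil => simp
  | cons x xs ih => simp [ih, List.append_assoc]

theorem pvFoldl_pair {α : Type} (u v : α → List Int) (l : List α) (ab : List Int × List Int) :
    l.foldl (fun acc x => (acc.1 ++ u x, acc.2 ++ v x)) ab = (ab.1 ++ l.flatMap u, ab.2 ++ l.flatMap v) := by
  induction l generalizing ab with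
  | nil => simp
  | cons x xs ih => simp [ih, List.append_assoc]

theorem pvFlatMap_congr {α β : Type} (l : List α) (f g : α → List β) (h : ∀ x ∈ l, f x = g x) :
    l.flatMap f = l.flatMap g := by
  induction l with
  | nil => rfl
  | cons x xs ih => simp [List.flatMap_cons, h x (by simp), ih (fun y hy => h y (by simp [hy]))]

-- A's pass-1 inner loop over one id's keys
theorem pvA_inner1 (sm : List (String × List (String × List (String × Option Int)))) (id : String)
    (keys : List String) (acc : List Int) :
    keys.foldl (fun index key =>
        if pvAnyKw "ALL,MAX,TOTAL,CURRENT,NEXT,TOTAL,TOKEN" key then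
          if pvAnyKw "TOKEN,SUPPLY,INDEX,MINTED" key then
            match pvSlotCell sm id key with
            | some (some v) => index ++ [v]
            | _ => index
          else index
        else index) acc
      = acc ++ keys.flatMap (pvG1 sm id) := by
  rw [show (fun (index : List Int) key =>
        if pvAnyKw "ALL,MAX,TOTAL,CURRENT,NEXT,TOTAL,TOKEN" key then
          if pvAnyKw "TOKEN,SUPPLY,INDEX,MINTED" key then
            match pvSlotCell sm id key with
            | some (some v) => index ++ [v]
            | _ => index
          else index
        else index) = fun index key => index ++ pvG1 sm id key from ?_, pvFoldl_append]
  funext index key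
  unfold pvG1 pvM1 pvCellL
  by_cases h1 : pvAnyKw "ALL,MAX,TOTAL,CURRENT,NEXT,TOTAL,TOKEN" key <;>
    by_cases h2 : pvAnyKw "TOKEN,SUPPLY,INDEX,MINTED" key <;>
    rcases pvSlotCell sm id key with _ | (_ | v) <;> simp [h1, h2]

-- A's pass-2 inner loop
theorem pvA_inner2 (sm : List (String × List (String × List (String × Option Int)))) (id : String)
    (keys : List String) (acc : List Int) :
    keys.foldl (fun index key =>
        if pvAnyKw "COUNTER,SUPPLY,MINTCOUNT" key then
          match pvSlotCell sm id key with
          | some (some v) => index ++ [v]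
          | _ => index
        else index) acc
      = acc ++ keys.flatMap (pvG2 sm id) := by
  rw [show (fun (index : List Int) key =>
        if pvAnyKw "COUNTER,SUPPLY,MINTCOUNT" key then
          match pvSlotCell sm id key with
          | some (some v) => index ++ [v]
          | _ => index
        else index) = fun index key => index ++ pvG2 sm id key from ?_, pvFoldl_append]
  funext index key
  unfold pvG2 pvM2 pvCellL
  by_cases h1 : pvAnyKw "COUNTER,SUPPLY,MINTCOUNT" key <;>
    rcases pvSlotCell sm id key with _ | (_ | v) <;> simp [h1]

-- B's inner loop computes both flatMaps at once
theorem pvB_inner (sm : List (String × List (String × List (String × Option Int)))) (id : String)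
    (keys : List String) (ab : List Int × List Int) :
    keys.foldl (fun (acc : List Int × List Int) key =>
        let K := PySem.Str.upper key
        let m1 := (pvAltSplit "ALL,MAX,TOTAL,CURRENT,NEXT,TOTAL,TOKEN").any (fun w => PySem.Str.isIn w K) &&
                  (pvAltSplit "TOKEN,SUPPLY,INDEX,MINTED").any (fun w => PySem.Str.isIn w K)
        let m2 := (pvAltSplit "COUNTER,SUPPLY,MINTCOUNT").any (fun w => PySem.Str.isIn w K)
        if m1 || m2 then
          match (pvAltCell sm id key).getD none with
          | some v =>
              ((if m1 then acc.1 ++ [v] else acc.1), (if m2 then acc.2 ++ [v] else acc.2))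
          | none => acc
        else acc) ab
      = (ab.1 ++ keys.flatMap (pvG1 sm id), ab.2 ++ keys.flatMap (pvG2 sm id)) := by
  rw [show (fun (acc : List Int × List Int) key =>
        let K := PySem.Str.upper key
        let m1 := (pvAltSplit "ALL,MAX,TOTAL,CURRENT,NEXT,TOTAL,TOKEN").any (fun w => PySem.Str.isIn w K) &&
                  (pvAltSplit "TOKEN,SUPPLY,INDEX,MINTED").any (fun w => PySem.Str.isIn w K)
        let m2 := (pvAltSplit "COUNTER,SUPPLY,MINTCOUNT").any (fun w => PySem.Str.isIn w K)
        if m1 || m2 then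
          match (pvAltCell sm id key).getD none with
          | some v =>
              ((if m1 then acc.1 ++ [v] else acc.1), (if m2 then acc.2 ++ [v] else acc.2))
          | none => acc
        else acc) = fun acc key => (acc.1 ++ pvG1 sm id key, acc.2 ++ pvG2 sm id key) from ?_,
      pvFoldl_pair]
  funext acc key
  have e1 : ((pvAltSplit "ALL,MAX,TOTAL,CURRENT,NEXT,TOTAL,TOKEN").any (fun w => PySem.Str.isIn w (PySem.Str.upper key)) &&
      (pvAltSplit "TOKEN,SUPPLY,INDEX,MINTED").any (fun w => PySem.Str.isIn w (PySem.Str.upper key))) = pvM1 key := by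
    unfold pvM1
    rw [pvAnyKw_eq _ (by decide), pvAnyKw_eq _ (by decide)]
  have e2 : (pvAltSplit "COUNTER,SUPPLY,MINTCOUNT").any (fun w => PySem.Str.isIn w (PySem.Str.upper key)) = pvM2 key := by
    unfold pvM2
    rw [pvAnyKw_eq _ (by decide)]
  simp only [e1, e2, pvAltCell_eq]
  unfold pvG1 pvG2 pvCellL
  by_cases h1 : pvM1 key <;> by_cases h2 : pvM2 key <;>
    rcases pvSlotCell sm id key with _ | (_ | v) <;> simp [h1, h2]

-- under Nodup keys, A's dict lookup of an entry's keys returns that entry's value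
theorem pvGetD_self (itsv : List (String × List String)) (hNd : (itsv.map Prod.fst).Nodup)
    (p : String × List String) (hp : p ∈ itsv) :
    (PySem.Dict.mk itsv).getD p.1 [] = p.2 := by
  apply PySem.Dict.getD_of_mem_items (k := p.1) (v := p.2)
  · exact hp
  · simpa using hNd

-- ===== VERDICT (by name: the statement is the Claim_ definition above) =====
theorem match_supply_spec : Claim_equal_match_supply := by
  intro itsv sm _hDom hPre
  obtain ⟨hNd, -, -, -⟩ := hPre
  have hKeys1 : itsv.flatMap (fun p => ((PySem.Dict.mk itsv).getD p.1 []).flatMap (pvG1 sm p.1))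
      = itsv.flatMap (fun p => p.2.flatMap (pvG1 sm p.1)) :=
    pvFlatMap_congr _ _ _ (fun p hp => by rw [pvGetD_self itsv hNd p hp])
  have hKeys2 : itsv.flatMap (fun p => ((PySem.Dict.mk itsv).getD p.1 []).flatMap (pvG2 sm p.1))
      = itsv.flatMap (fun p => p.2.flatMap (pvG2 sm p.1)) :=
    pvFlatMap_congr _ _ _ (fun p hp => by rw [pvGetD_self itsv hNd p hp])
  unfold Spec_match_supply match_supply match_supply_alt
  simp only [pvA_inner1, pvA_inner2, pvB_inner, pvFoldl_append, pvFoldl_pair,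
    List.nil_append, hKeys1, hKeys2]
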